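-- pv_equiv track=rewrite | github.com/eliottcassidy2000/math | 04-computation/signed_redei_proof.py | fwd_polynomial_full
-- ===== SOURCE A (Python) =====
-- from itertools import permutations
-- from collections import Counter, defaultdict
--
-- def fwd_polynomial_full(A, n):
--     """Compute F(T,x) as dict fwd_count -> number_of_paths."""
--     poly = Counter()
--     for perm in permutations(range(n)):
--         valid = True
--         for i in range(n-1):
--             if A[perm[i]][perm[i+1]] != 1:
--                 valid = False
--                 break
--         if valid:
--             fwd = sum(1 for i in range(n-1) if perm[i] < perm[i+1])
--             poly[fwd] += 1
--     return poly
-- ===== SOURCE B (Python) =====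
-- def fwd_polynomial_full(A, n):
--     """Compute F(T,x) as dict fwd_count -> number_of_paths.
--
--     Backtracking DFS: extend valid path prefixes only (pruning invalid
--     branches instead of generating and testing all n! permutations),
--     keeping the forward-edge count incrementally."""
--     poly = {}
--     verts = list(range(n))
--     if not verts:
--         poly[0] = poly.get(0, 0) + 1
--         return poly
--
--     def dfs(last, remaining, fwd):
--         if not remaining:
--             poly[fwd] = poly.get(fwd, 0) + 1
--             return
--         for v in remaining:
--             if A[last][v] == 1:
--                 dfs(v, [w for w in remaining if w != v],
--                     fwd + (1 if last < v else 0))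
--
--     for s in verts:
--         dfs(s, [w for w in verts if w != s], 0)
--     return poly
-- ===== Notes on version B (the rewrite author's own statement) =====
-- stated objective: alternative
-- what changed: B replaces A's generate-and-test over all n! permutations by a recursive backtracking DFS that extends only valid path prefixes (pruning a branch at its first non-edge) and carries the forward-edge count incrementally instead of recounting it per permutation.
-- outside the precondition, e.g. on fwd_polynomial_full([[0, 0], [0]], 2): A returns {}, B returns {}
import Mathlib
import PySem

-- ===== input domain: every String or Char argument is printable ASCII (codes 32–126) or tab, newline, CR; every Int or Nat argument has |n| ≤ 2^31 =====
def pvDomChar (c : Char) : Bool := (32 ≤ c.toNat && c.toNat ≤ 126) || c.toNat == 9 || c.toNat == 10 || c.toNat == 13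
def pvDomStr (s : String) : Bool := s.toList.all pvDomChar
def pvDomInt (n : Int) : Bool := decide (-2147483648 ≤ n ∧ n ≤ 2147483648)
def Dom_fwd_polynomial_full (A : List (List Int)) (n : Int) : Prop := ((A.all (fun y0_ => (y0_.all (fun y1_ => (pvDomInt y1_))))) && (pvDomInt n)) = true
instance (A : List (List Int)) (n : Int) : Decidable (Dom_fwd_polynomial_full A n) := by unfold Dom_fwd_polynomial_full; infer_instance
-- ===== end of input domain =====

-- B replaces A's generate-and-test over all n! permutations by a backtracking DFS that extends
-- only valid path prefixes (pruning dead branches) and carries the forward-edge count incrementally.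

-- ===== PORT A =====
-- A[u][v]; the default is never reached on inputs satisfying Pre_ (out of range = IndexError)
def pvEntry (A : List (List Int)) (u v : Int) : Int :=
  PySem.List.pyGetD (PySem.List.pyGetD A u []) v 0

-- 'for i in range(n-1): if A[perm[i]][perm[i+1]] != 1: valid = False; break'
def pvValidLoop (A : List (List Int)) (perm : List Int) : List Int → Bool
  | [] => true
  | i :: rest =>
    if pvEntry A (PySem.List.pyGetD perm i 0) (PySem.List.pyGetD perm (i + 1) 0) ≠ 1 then false
    else pvValidLoop A perm rest

def fwd_polynomial_full (A : List (List Int)) (n : Int) : List (Int × Int) :=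
  let verts := PySem.List.pyRange 0 n 1
  ((PySem.List.permutations verts verts.length).foldl
    (fun poly perm =>
      if pvValidLoop A perm (PySem.List.pyRange 0 (n - 1) 1) then
        poly.modify ((((PySem.List.pyRange 0 (n - 1) 1).filter
            (fun i => decide (PySem.List.pyGetD perm i 0 < PySem.List.pyGetD perm (i + 1) 0))).map
            (fun _ => (1 : Int))).sum) 0 (· + 1)
      else poly)
    PySem.Dict.empty).items

-- ===== PORT B =====
-- 'def dfs(last, remaining, fwd): …' from Source B (recursion on the shrinking 'remaining')
def pvDfs (A : List (List Int)) (last : Int) (remaining : List Int) (fwd : Int)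
    (poly : PySem.Dict Int Int) : PySem.Dict Int Int :=
  if remaining.isEmpty then poly.insert fwd (poly.getD fwd 0 + 1)
  else remaining.attach.foldl
    (fun poly v =>
      if pvEntry A last v.1 = 1 then
        pvDfs A v.1 (remaining.filter (fun w => decide (w ≠ v.1)))
          (fwd + if last < v.1 then 1 else 0) poly
      else poly)
    poly
termination_by remaining.length
decreasing_by
  simp only [List.length_unattach]
  calc (List.filter (fun x : {x // x ∈ remaining} => decide (↑x ≠ (v : Int))) remaining.attach).length
      < remaining.attach.length := by
        apply List.length_filter_lt_length_iff_exists.mpr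
        exact ⟨v, List.mem_attach _ _, by simp⟩
    _ = remaining.length := by simp

def fwd_polynomial_full_alt (A : List (List Int)) (n : Int) : List (Int × Int) :=
  let verts := PySem.List.pyRange 0 n 1
  if verts.isEmpty then
    ((PySem.Dict.empty (κ := Int) (ν := Int)).insert 0
      ((PySem.Dict.empty (κ := Int) (ν := Int)).getD 0 0 + 1)).items
  else
    (verts.foldl
      (fun poly s => pvDfs A s (verts.filter (fun w => decide (w ≠ s))) 0 poly)
      PySem.Dict.empty).items

-- ===== PRECONDITION & SPEC =====
-- Pre_ asks for an n×n-filled matrix (first n rows with at least n entries) when n ≥ 2; outside it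
-- Python A (and B) can hit an IndexError on A[u][v]. This is slightly narrower than A's exact
-- domain: A also returns on ragged matrices whenever every path prefix hits a non-1 edge before
-- the missing entry would be indexed (the inner loop breaks first); Pre_ conservatively excludes
-- those inputs, on which B returns the same value as A anyway. (The proved equality of the two
-- ports holds for every input — both ports read entries through the same total accessor pvEntry —
-- so the proof does not need Pre_; Pre_ only delimits where the ports model the Python exactly.)
def Pre_fwd_polynomial_full (A : List (List Int)) (n : Int) : Prop :=
  2 ≤ n → ((n ≤ A.length) ∧ ∀ row ∈ A.take n.toNat, n ≤ row.length)
instance (A : List (List Int)) (n : Int) : Decidable (Pre_fwd_polynomial_full A n) := by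
  unfold Pre_fwd_polynomial_full; infer_instance

def pvWitness_fwd_polynomial_full : List (List Int) × Int := ([[0, 1, 1], [0, 0, 1], [1, 0, 0]], 3)

def Spec_fwd_polynomial_full (A : List (List Int)) (n : Int) (out : List (Int × Int)) : Prop := out = fwd_polynomial_full_alt A n
instance (A : List (List Int)) (n : Int) (out : List (Int × Int)) : Decidable (Spec_fwd_polynomial_full A n out) := by unfold Spec_fwd_polynomial_full; infer_instance

-- ===== CLAIM (what is proved, stated in full; the proofs are below) =====
def Claim_equal_fwd_polynomial_full : Prop := ∀ (A : List (List Int)) (n : Int), Dom_fwd_polynomial_full A n → Pre_fwd_polynomial_full A n → Spec_fwd_polynomial_full A n (fwd_polynomial_full A n)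

-- ===== LEMMAS AND PROOFS =====

-- validity / forward count of a whole vertex chain, phrased structurally (proof-side only)
def pvValid (A : List (List Int)) (xs : List Int) : Bool :=
  (xs.zip xs.tail).all (fun p => pvEntry A p.1 p.2 == 1)

def pvFwd (xs : List Int) : Int :=
  ((xs.zip xs.tail).map (fun p => if p.1 < p.2 then (1 : Int) else 0)).sum

-- forward counts of all valid completions of a path prefix ending in `last`, in DFS = lex order
def pvEmit (A : List (List Int)) (last : Int) (remaining : List Int) (fwd : Int) : List Int :=
  (PySem.List.permutations remaining remaining.length).filterMap
    (fun q => if pvValid A (last :: q) then some (fwd + pvFwd (last :: q)) else none)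

def pvStep (d : PySem.Dict Int Int) (x : Int) : PySem.Dict Int Int :=
  d.insert x (d.getD x 0 + 1)

lemma pv_filter_ne_eraseIdx (l : List Int) (h : l.Nodup) (i : Nat) (hi : i < l.length) :
    l.filter (fun w => decide (w ≠ l[i])) = l.eraseIdx i := by
  induction l generalizing i with
  | nil => simp at hi
  | cons x t ih =>
    cases i with
    | zero => simp at h ⊢; intro a ha hax; exact absurd (hax ▸ ha) h.1
    | succ j =>
      simp at h hi ⊢
      rw [List.filter_cons]
      have hx : (!decide (x = t[j])) = true := by
        simp; intro hx; exact h.1 (hx ▸ List.getElem_mem hi)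
      simp only [hx, if_true]
      have := ih h.2 j hi
      simp at this
      simp [this]

lemma pv_pairs_eq (xs : List Int) :
    (List.range (xs.length - 1)).map (fun i => (xs.getD i 0, xs.getD (i + 1) 0)) = xs.zip xs.tail := by
  apply List.ext_getElem
  · simp
  · intro i h1 h2
    simp only [List.getElem_map, List.getElem_range, List.getElem_zip, List.getElem_tail]
    have hi : i < xs.length - 1 := by simpa using h1
    rw [List.getD_eq_getElem xs 0 (by omega), List.getD_eq_getElem xs 0 (by omega)]

lemma pv_pyRange_pred (n : Int) (h : 0 ≤ n) :
    PySem.List.pyRange 0 (n - 1) 1 = (List.range (n.toNat - 1)).map (fun i : Nat => (i : Int)) := by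
  rcases Int.lt_or_le 0 n with h0 | h0
  · have he : n - 1 = ((n.toNat - 1 : Nat) : Int) := by omega
    rw [he, PySem.List.pyRange_zero_natCast]
  · have hn : n = 0 := le_antisymm h0 h
    subst hn
    have he : (0 : Int) - 1 = -1 := by norm_num
    rw [he, PySem.List.pyRange_of_pos 0 (-1) (by norm_num)]
    norm_num

lemma pv_validLoop_all (A : List (List Int)) (xs : List Int) (l : List Int) :
    pvValidLoop A xs l = l.all (fun i =>
      pvEntry A (PySem.List.pyGetD xs i 0) (PySem.List.pyGetD xs (i + 1) 0) == 1) := by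
  induction l with
  | nil => rfl
  | cons i rest ih =>
    by_cases h : pvEntry A (PySem.List.pyGetD xs i 0) (PySem.List.pyGetD xs (i + 1) 0) = 1 <;>
      simp [pvValidLoop, h, ih]

lemma pv_validLoop_eq (A : List (List Int)) (xs : List Int) (n : Int) (h0 : 0 ≤ n)
    (hl : xs.length = n.toNat) :
    pvValidLoop A xs (PySem.List.pyRange 0 (n - 1) 1) = pvValid A xs := by
  rw [pv_validLoop_all, pv_pyRange_pred n h0, List.all_map, pvValid, ← pv_pairs_eq, List.all_map, hl]
  congr 1
  funext i
  show (pvEntry A (PySem.List.pyGetD xs (i : Int) 0) (PySem.List.pyGetD xs ((i : Int) + 1) 0) == 1)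
      = (pvEntry A (xs.getD i 0) (xs.getD (i + 1) 0) == 1)
  have hc : ((i : Int) + 1) = ((i + 1 : Nat) : Int) := by push_cast; ring
  rw [hc, PySem.List.pyGetD_natCast, PySem.List.pyGetD_natCast]

lemma pv_fwdLoop_eq (xs : List Int) (n : Int) (h0 : 0 ≤ n) (hl : xs.length = n.toNat) :
    (((PySem.List.pyRange 0 (n - 1) 1).filter
        (fun i => decide (PySem.List.pyGetD xs i 0 < PySem.List.pyGetD xs (i + 1) 0))).map
        (fun _ => (1 : Int))).sum = pvFwd xs := by
  have hfwd : pvFwd xs = ((xs.zip xs.tail).countP (fun p => decide (p.1 < p.2)) : Int) := by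
    rw [pvFwd, ← PySem.List.sum_map_ite_one_zero (fun p : Int × Int => decide (p.1 < p.2))]
    congr 2
    funext p
    split_ifs <;> simp_all
    omega
  rw [pv_pyRange_pred n h0, PySem.List.sum_map_const_int, mul_one,
    ← List.countP_eq_length_filter, List.countP_map, hfwd, ← pv_pairs_eq, List.countP_map, hl]
  congr 2
  funext i
  show decide (PySem.List.pyGetD xs (i : Int) 0 < PySem.List.pyGetD xs ((i : Int) + 1) 0)
      = decide (xs.getD i 0 < xs.getD (i + 1) 0)
  have hc : ((i : Int) + 1) = ((i + 1 : Nat) : Int) := by push_cast; ring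
  rw [hc, PySem.List.pyGetD_natCast, PySem.List.pyGetD_natCast]

lemma pvValid_cons (A : List (List Int)) (u v : Int) (q : List Int) :
    pvValid A (u :: v :: q) = ((pvEntry A u v == 1) && pvValid A (v :: q)) := by
  simp [pvValid]

lemma pvFwd_cons (u v : Int) (q : List Int) :
    pvFwd (u :: v :: q) = (if u < v then 1 else 0) + pvFwd (v :: q) := by
  simp [pvFwd]

lemma pv_self_map_range (l : List Int) : (List.range l.length).map (fun i => l.getD i 0) = l := by
  apply List.ext_getElem
  · simp
  · intro i h1 h2
    simp only [List.getElem_map, List.getElem_range]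
    rw [List.getD_eq_getElem l 0 (by simpa using h1)]

lemma pv_foldl_index (l : List Int) (f : PySem.Dict Int Int → Int → PySem.Dict Int Int)
    (init : PySem.Dict Int Int) :
    l.foldl f init = (List.range l.length).foldl (fun d i => f d (l.getD i 0)) init := by
  conv_lhs => rw [← pv_self_map_range l]
  rw [List.foldl_map]

lemma pv_dfs_eq (A : List (List Int)) :
    ∀ (m : Nat) (remaining : List Int), remaining.length = m → remaining.Nodup →
    ∀ (last fwd : Int) (poly : PySem.Dict Int Int),
      pvDfs A last remaining fwd poly = (pvEmit A last remaining fwd).foldl pvStep poly := by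
  intro m
  induction m using Nat.strong_induction_on with
  | _ m ih =>
    intro remaining hm hnd last fwd poly
    cases m with
    | zero =>
      have hr : remaining = [] := List.eq_nil_of_length_eq_zero hm
      subst hr
      have hemit : pvEmit A last [] fwd = [fwd] := by
        simp [pvEmit, PySem.List.permutations_zero, pvValid, pvFwd]
      rw [hemit, pvDfs]
      rfl
    | succ k =>
      have hne : remaining.isEmpty = false := by
        cases remaining <;> simp_all
      rw [pvDfs]
      simp only [hne, Bool.false_eq_true, if_false]
      rw [List.foldl_attach (f := fun poly v =>
        if pvEntry A last v = 1 then
          pvDfs A v (remaining.filter (fun w => decide (w ≠ v)))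
            (fwd + if last < v then 1 else 0) poly
        else poly)]
      have hlen : remaining.length = k + 1 := hm
      -- index form of the left fold
      rw [pv_foldl_index]
      -- index form of the right fold
      rw [pvEmit, hlen, PySem.List.permutations_succ, List.filterMap_flatMap, List.foldl_flatMap, hlen]
      apply PySem.List.foldl_congr_mem
      intro acc i hi
      have hi' : i < remaining.length := by rw [hlen]; simpa using hi
      have hgd : remaining.getD i 0 = remaining[i] := List.getD_eq_getElem remaining 0 hi'
      have hsome : remaining[i]? = some remaining[i] := List.getElem?_eq_getElem hi'
      rw [hgd, hsome]
      have herase : (remaining.eraseIdx i).length = k := by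
        rw [List.length_eraseIdx_of_lt hi', hlen]
        omega
      by_cases hE : pvEntry A last remaining[i] = 1
      · rw [if_pos hE, pv_filter_ne_eraseIdx remaining hnd i hi']
        rw [ih k (Nat.lt_succ_self k) (remaining.eraseIdx i) herase (hnd.eraseIdx i)]
        simp only [List.filterMap_map]
        congr 1
        rw [pvEmit, herase]
        symm
        apply List.filterMap_congr
        intro q hq
        show (if pvValid A (last :: remaining[i] :: q) then
                some (fwd + pvFwd (last :: remaining[i] :: q)) else none)
            = (if pvValid A (remaining[i] :: q) then
                some ((fwd + if last < remaining[i] then 1 else 0) + pvFwd (remaining[i] :: q)) else none)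
        rw [pvValid_cons, pvFwd_cons]
        simp only [hE, beq_self_eq_true, Bool.true_and]
        by_cases hval : pvValid A (remaining[i] :: q)
        · rw [if_pos hval, if_pos hval]
          congr 1
          ring
        · rw [if_neg (by simp [hval]), if_neg (by simp [hval])]
      · rw [if_neg hE]
        have hnil : ((PySem.List.permutations (remaining.eraseIdx i) k).map
            (fun p => remaining[i] :: p)).filterMap
            (fun q => if pvValid A (last :: q) then some (fwd + pvFwd (last :: q)) else none) = [] := by
          rw [List.filterMap_map]
          apply List.filterMap_eq_nil_iff.mpr
          intro q hq
          show (if pvValid A (last :: remaining[i] :: q) then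
                  some (fwd + pvFwd (last :: remaining[i] :: q)) else none) = none
          rw [pvValid_cons]
          simp [hE]
        rw [hnil]
        rfl

lemma pv_filter_map_filterMap (l : List (List Int)) (p : List Int → Bool) (f : List Int → Int) :
    (l.filter p).map f = l.filterMap (fun x => if p x then some (f x) else none) := by
  induction l with
  | nil => rfl
  | cons x t ih => by_cases h : p x <;> simp [h, ih]

lemma pv_main (A : List (List Int)) (n : Int) :
    fwd_polynomial_full A n = fwd_polynomial_full_alt A n := by
  unfold fwd_polynomial_full fwd_polynomial_full_alt
  by_cases hv : (PySem.List.pyRange 0 n 1).isEmpty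
  · -- n ≤ 0 : the one empty permutation, F = {0: 1} on both sides
    have hnil : PySem.List.pyRange 0 n 1 = [] := by simpa using hv
    have hr1 : PySem.List.pyRange 0 (n - 1) 1 = [] := by
      have hn0 : ¬ 0 < n := by
        intro h
        have : (0 : Int) ∈ PySem.List.pyRange 0 n 1 := by
          rw [PySem.List.pyRange_of_pos 0 n (by norm_num)]
          simp [h]
        rw [hnil] at this
        simp at this
      rw [PySem.List.pyRange_of_pos 0 (n - 1) (by norm_num)]
      simp
      intro h
      omega
    simp only [hnil, hr1]
    simp [PySem.List.permutations_zero, pvValidLoop]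
    rfl
  · -- n ≥ 1
    have hpos : 0 < n := by
      by_contra h
      have : PySem.List.pyRange 0 n 1 = [] := by
        rw [PySem.List.pyRange_of_pos 0 n (by norm_num)]
        simp
        intro h2
        omega
      simp [this] at hv
    have h0 : 0 ≤ n := le_of_lt hpos
    set m := n.toNat with hmdef
    have hm1 : 1 ≤ m := by omega
    have hncast : n = (m : Int) := by omega
    have hvm : PySem.List.pyRange 0 n 1 = (List.range m).map (fun i : Nat => (i : Int)) := by
      rw [hncast, PySem.List.pyRange_zero_natCast]
    have hlen : (PySem.List.pyRange 0 n 1).length = m := by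
      rw [hvm]; simp
    have hnodup : (PySem.List.pyRange 0 n 1).Nodup := by
      rw [hvm]
      exact (List.nodup_range).map (fun a b => by omega)
    simp only [hv, Bool.false_eq_true, if_false]
    -- A's loop: filter the valid permutations, then count their forward numbers
    rw [PySem.List.foldl_if_eq_foldl_filter
      (p := fun perm => pvValidLoop A perm (PySem.List.pyRange 0 (n - 1) 1))]
    rw [← List.foldl_map (f := fun perm : List Int => (((PySem.List.pyRange 0 (n - 1) 1).filter
          (fun i => decide (PySem.List.pyGetD perm i 0 < PySem.List.pyGetD perm (i + 1) 0))).map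
          (fun _ => (1 : Int))).sum)
        (g := fun (d : PySem.Dict Int Int) (x : Int) => d.modify x 0 (· + 1))]
    rw [← PySem.Dict.counter_eq_foldl]
    -- B's DFS emits, start vertex by start vertex, the same forward numbers
    have hB : (PySem.List.pyRange 0 n 1).foldl
        (fun poly s => pvDfs A s ((PySem.List.pyRange 0 n 1).filter (fun w => decide (w ≠ s))) 0 poly)
        PySem.Dict.empty
        = PySem.Dict.counter ((List.range m).flatMap
            (fun (i : Nat) => pvEmit A ((i : Int)) ((PySem.List.pyRange 0 n 1).eraseIdx i) 0)) := by
      conv_lhs => rw [hvm, List.foldl_map]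
      rw [← hvm]
      refine Eq.trans (PySem.List.foldl_congr_mem (List.range m)
        (fun d (i : Nat) => pvDfs A ((i : Int))
          ((PySem.List.pyRange 0 n 1).filter (fun w => decide (w ≠ ((i : Int))))) 0 d)
        (fun d (i : Nat) => (pvEmit A ((i : Int)) ((PySem.List.pyRange 0 n 1).eraseIdx i) 0).foldl pvStep d)
        PySem.Dict.empty ?_) ?_
      · intro acc i hi
        have hi' : i < m := by simpa using hi
        have hgi : (PySem.List.pyRange 0 n 1)[i]'(by omega) = (i : Int) := by
          simp [hvm]
        have hfe : (PySem.List.pyRange 0 n 1).filter (fun w => decide (w ≠ (i : Int)))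
            = (PySem.List.pyRange 0 n 1).eraseIdx i := by
          rw [← hgi]
          exact pv_filter_ne_eraseIdx _ hnodup i (by omega)
        simp only [hfe]
        exact pv_dfs_eq A ((PySem.List.pyRange 0 n 1).eraseIdx i).length _ rfl
          (hnodup.eraseIdx i) _ _ _
      · rw [← List.foldl_flatMap]
        rw [show pvStep = (fun d x => d.insert x (d.getD x 0 + 1)) from rfl]
        rw [PySem.Dict.foldl_insert_getD_add_one_eq_counter]
    rw [hB]
    congr 1
    -- the emitted forward-number lists coincide
    rw [List.filter_congr (q := fun perm => pvValid A perm) ?_]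
    swap
    · intro perm hperm
      exact pv_validLoop_eq A perm n h0
        (by rw [PySem.List.length_of_mem_permutations hperm, hlen])
    rw [List.map_congr_left (g := fun perm => pvFwd perm) ?_]
    swap
    · intro perm hperm
      exact pv_fwdLoop_eq perm n h0
        (by rw [PySem.List.length_of_mem_permutations (List.mem_of_mem_filter hperm), hlen])
    rw [pv_filter_map_filterMap]
    have hsucc : (PySem.List.pyRange 0 n 1).length = (m - 1) + 1 := by omega
    rw [hsucc, PySem.List.permutations_succ, List.filterMap_flatMap, hlen]
    rw [List.flatMap_def, List.flatMap_def]
    refine congrArg (fun L => PySem.Dict.counter (κ := Int) L)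
      (congrArg List.flatten (List.map_congr_left ?_))
    intro i hi
    have hi' : i < m := by simpa using hi
    have hgi : (PySem.List.pyRange 0 n 1)[i]'(by omega) = (i : Int) := by
      simp [hvm]
    have hsome : (PySem.List.pyRange 0 n 1)[i]? = some ((i : Int)) := by
      rw [List.getElem?_eq_getElem (by omega), hgi]
    rw [hsome]
    have he : ((PySem.List.pyRange 0 n 1).eraseIdx i).length = m - 1 := by
      rw [List.length_eraseIdx_of_lt (by omega), hlen]
    rw [List.filterMap_map, pvEmit, he]
    apply List.filterMap_congr
    intro q hq
    simp

-- ===== VERDICT (by name: the statement is the Claim_ definition above) =====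
theorem fwd_polynomial_full_spec : Claim_equal_fwd_polynomial_full := by
  intro A n _ _
  unfold Spec_fwd_polynomial_full
  exact pv_main A n
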